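-- pv_equiv track=rewrite | github.com/GinnieMorrison/Kelly_B_Scripts | Sig_Kelly_B_gff.py | range_in_gene
-- ===== SOURCE A (Python) =====
-- from collections import defaultdict
--
-- def range_in_gene(genes,ranges):
--
--     from bisect import insort
--
--     OUTSIDE_START=1
--     INSIDE1=2
--     INSIDE2=3
--     OUTSIDE_STOP=4
--
--     locations=[]
--
--     for ran in ranges:
--         insort(locations,(int(ran[0]),INSIDE1,ran[2]))
--         insort(locations, (int(ran[1]),INSIDE2,ran[2]))
--
--     for gene in iter(genes):
--         insort(locations,(genes[gene][0],OUTSIDE_START,gene))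
--         insort(locations,(genes[gene][1],OUTSIDE_STOP,gene))
--
--     r_in_g=defaultdict(list)
--
--     in_gene = []
--
--     for (position, what, item) in locations:
--         if what == OUTSIDE_START:
--           in_gene.append(item)
--         elif what == OUTSIDE_STOP:
--           in_gene.remove(item)
--         elif what == INSIDE1:
--            for _range in in_gene:
--                r_in_g[item].append(_range)
--
--     return(r_in_g)
-- ===== SOURCE B (Python) =====
-- def range_in_gene(genes, ranges):
--     # Direct interval stabbing: no sweep line, no active list, no event merging.
--     # For each range start (sorted by (position, name) to reproduce the sweep's
--     # key-creation and append order), just scan the (start, name, stop) gene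
--     # triples sorted by (start, name) and keep those whose interval contains it.
--     order = sorted((vals[0], name, vals[1]) for name, vals in genes.items())
--     out = {}
--     for p, r in sorted((ran[0], ran[2]) for ran in ranges):
--         hits = [name for s, name, e in order if s <= p <= e]
--         if hits:
--             out.setdefault(r, []).extend(hits)
--     return out
-- ===== Notes on version B (the rewrite author's own statement) =====
-- stated objective: alternative
-- what changed: B replaces the sweep line entirely: no event list, no insort/sort-merge of gene and range events and no active list with append/remove; it sorts the gene triples and the range starts separately and answers each range start by a direct interval-stabbing scan of the gene list, assembling the dict with setdefault/extend.
-- outside the precondition, e.g. on range_in_gene({'g': [5, 1]}, [(0, 0, 'r')]): A raises ValueError, B returns {}; on range_in_gene({'g': [1]}, []): A raises IndexError, B raises IndexError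
import Mathlib
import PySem

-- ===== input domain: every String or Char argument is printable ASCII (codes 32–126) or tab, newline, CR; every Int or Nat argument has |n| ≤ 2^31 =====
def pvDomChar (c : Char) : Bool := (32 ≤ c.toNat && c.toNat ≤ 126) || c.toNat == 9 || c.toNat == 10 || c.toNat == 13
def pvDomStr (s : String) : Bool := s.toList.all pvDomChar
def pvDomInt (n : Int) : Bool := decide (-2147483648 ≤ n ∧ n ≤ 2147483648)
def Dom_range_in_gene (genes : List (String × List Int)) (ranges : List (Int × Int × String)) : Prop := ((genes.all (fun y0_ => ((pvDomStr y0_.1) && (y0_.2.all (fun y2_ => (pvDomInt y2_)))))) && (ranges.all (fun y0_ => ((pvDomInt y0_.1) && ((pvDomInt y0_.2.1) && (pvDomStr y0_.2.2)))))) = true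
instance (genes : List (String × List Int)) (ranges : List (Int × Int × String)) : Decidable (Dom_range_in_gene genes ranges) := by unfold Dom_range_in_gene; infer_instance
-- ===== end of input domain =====

-- B abandons A's sweep line altogether (no merged event list, no active list with
-- append/remove): it sorts the gene triples and the range starts separately and answers
-- each range start by a direct interval-stabbing scan of the gene triples; objective:
-- alternative algorithm of similar cost.

-- Python's tuple '<' on the (position, tag, name) event triples = this lexicographic key.
def pvEvKey (e : Int × Int × String) : Int ×ₗ (Int ×ₗ String) := toLex (e.1, toLex e.2)

-- ===== PORT A =====
-- bisect.insort for these triples: insert x before the first element strictly greater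
-- than x (bisect_right position).  Exact: Python's tuple '<' is pvEvKey's order.
def pvInsort (l : List (Int × Int × String)) (x : Int × Int × String) : List (Int × Int × String) :=
  PySem.List.insertBy (fun a b => decide (pvEvKey a < pvEvKey b)) x l

-- A's two insort loops; tags: OUTSIDE_START=1, INSIDE1=2, INSIDE2=3, OUTSIDE_STOP=4
def pvLocations (genes : List (String × List Int)) (ranges : List (Int × Int × String)) :
    List (Int × Int × String) :=
  let l1 := ranges.foldl (fun acc ran => pvInsort (pvInsort acc (ran.1, 2, ran.2.2)) (ran.2.1, 3, ran.2.2)) []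
  genes.foldl (fun acc g =>
    pvInsort (pvInsort acc (PySem.List.pyGetD g.2 0 0, 1, g.1)) (PySem.List.pyGetD g.2 1 0, 4, g.1)) l1

-- one step of A's sweep; state = (r_in_g, in_gene).  remove?'s none is Python's
-- ValueError (excluded by Pre_); r_in_g[item].append(x) on the defaultdict is
-- insert item (getD item [] ++ [x]) (key created only when the inner loop runs).
def pvStepA (st : PySem.Dict String (List String) × List String) (e : Int × Int × String) :
    PySem.Dict String (List String) × List String :=
  if e.2.1 == 1 then (st.1, st.2 ++ [e.2.2])
  else if e.2.1 == 4 then (st.1, (PySem.List.remove? st.2 e.2.2).getD st.2)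
  else if e.2.1 == 2 then (st.2.foldl (fun d g => d.insert e.2.2 (d.getD e.2.2 [] ++ [g])) st.1, st.2)
  else st

def range_in_gene (genes : List (String × List Int)) (ranges : List (Int × Int × String)) : List (String × List String) :=
  ((pvLocations genes ranges).foldl pvStepA (PySem.Dict.empty, [])).1.items

-- ===== PORT B =====
-- Python's tuple '<' on the (start, name, stop) gene triples.
def pvTripKey (t : Int × String × Int) : Int ×ₗ (String ×ₗ Int) := toLex (t.1, toLex t.2)

-- Source B: order = sorted((vals[0], name, vals[1]) for name, vals in genes.items())
def pvOrderB (genes : List (String × List Int)) : List (Int × String × Int) :=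
  PySem.List.sorted (genes.map (fun g => (PySem.List.pyGetD g.2 0 0, g.1, PySem.List.pyGetD g.2 1 0))) pvTripKey

-- Source B: hits = [name for s, name, e in order if s <= p <= e]
def pvHits (order : List (Int × String × Int)) (p : Int) : List String :=
  (order.filter (fun t => decide (t.1 ≤ p) && decide (p ≤ t.2.2))).map (fun t => t.2.1)

-- Source B loop body: if hits: out.setdefault(r, []).extend(hits)
def pvQStep (order : List (Int × String × Int)) (d : PySem.Dict String (List String))
    (q : Int × String) : PySem.Dict String (List String) :=
  let hits := pvHits order q.1
  if hits.isEmpty then d else d.insert q.2 (d.getD q.2 [] ++ hits)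

def range_in_gene_alt (genes : List (String × List Int)) (ranges : List (Int × Int × String)) : List (String × List String) :=
  ((PySem.List.sorted (ranges.map (fun ran => (ran.1, ran.2.2))) (fun q => toLex q)).foldl
      (pvQStep (pvOrderB genes)) PySem.Dict.empty).items

-- ===== PRECONDITION & SPEC =====
-- Pre_ excludes exactly: gene value lists with fewer than two entries (Python A raises
-- IndexError), gene intervals with start > stop (A's in_gene.remove raises ValueError),
-- and association lists with duplicate gene keys, which cannot arise from the Python
-- dict argument (the dict collapses them), so the list-level behaviour is unspecified.
def Pre_range_in_gene (genes : List (String × List Int)) (ranges : List (Int × Int × String)) : Prop :=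
  (genes.map Prod.fst).Nodup ∧
    ∀ g ∈ genes, 2 ≤ g.2.length ∧ PySem.List.pyGetD g.2 0 0 ≤ PySem.List.pyGetD g.2 1 0
instance (genes : List (String × List Int)) (ranges : List (Int × Int × String)) : Decidable (Pre_range_in_gene genes ranges) := by unfold Pre_range_in_gene; infer_instance

def pvWitness_range_in_gene : (List (String × List Int)) × (List (Int × Int × String)) :=
  ([("g", [0, 5]), ("h", [3, 3])], [(1, 2, "r"), (3, 9, "s")])

def Spec_range_in_gene (genes : List (String × List Int)) (ranges : List (Int × Int × String)) (out : List (String × List String)) : Prop := out = range_in_gene_alt genes ranges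
instance (genes : List (String × List Int)) (ranges : List (Int × Int × String)) (out : List (String × List String)) : Decidable (Spec_range_in_gene genes ranges out) := by unfold Spec_range_in_gene; infer_instance

-- ===== CLAIM (what is proved, stated in full; the proofs are below) =====
def Claim_equal_range_in_gene : Prop := ∀ (genes : List (String × List Int)) (ranges : List (Int × Int × String)), Dom_range_in_gene genes ranges → Pre_range_in_gene genes ranges → Spec_range_in_gene genes ranges (range_in_gene genes ranges)

-- ===== LEMMAS AND PROOFS =====

-- abbreviations used only by the proofs
def pvTrip (g : String × List Int) : Int × String × Int :=
  (PySem.List.pyGetD g.2 0 0, g.1, PySem.List.pyGetD g.2 1 0)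
def pvSEv (t : Int × String × Int) : Int × Int × String := (t.1, 1, t.2.1)
def pvEEv (t : Int × String × Int) : Int × Int × String := (t.2.2, 4, t.2.1)
def pvIsG (e : Int × Int × String) : Bool := e.2.1 == 1 || e.2.1 == 4
def pvOpen (l : List (Int × Int × String)) (t : Int × String × Int) : Bool :=
  !(decide (pvSEv t ∈ l)) && decide (pvEEv t ∈ l)
def pvActL (SG : List (Int × String × Int)) (l : List (Int × Int × String)) : List String :=
  (SG.filter (pvOpen l)).map (fun t => t.2.1)

-- the unsorted multiset of events A inserts, in A's insertion order
def pvRawA (genes : List (String × List Int)) (ranges : List (Int × Int × String)) :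
    List (Int × Int × String) :=
  (ranges.flatMap fun ran => [(ran.1, 2, ran.2.2), (ran.2.1, 3, ran.2.2)]) ++
    (genes.flatMap fun g => [pvSEv (pvTrip g), pvEEv (pvTrip g)])

lemma pvEvKey_inj (a b : Int × Int × String) (h : pvEvKey a = pvEvKey b) : a = b := by
  obtain ⟨a1, a2, a3⟩ := a
  obtain ⟨b1, b2, b3⟩ := b
  simpa [pvEvKey, toLex_inj, Prod.ext_iff] using h

lemma pvTripKey_inj (a b : Int × String × Int) (h : pvTripKey a = pvTripKey b) : a = b := by
  obtain ⟨a1, a2, a3⟩ := a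
  obtain ⟨b1, b2, b3⟩ := b
  simpa [pvTripKey, toLex_inj, Prod.ext_iff] using h

lemma key_s_lt_q (s p : Int) (n r : String) :
    pvEvKey (s, 1, n) < pvEvKey (p, 2, r) ↔ s ≤ p := by
  simp only [pvEvKey, Prod.Lex.toLex_lt_toLex]
  norm_num
  omega

lemma key_q_lt_e (p e : Int) (r n : String) :
    pvEvKey (p, 2, r) < pvEvKey (e, 4, n) ↔ p ≤ e := by
  simp only [pvEvKey, Prod.Lex.toLex_lt_toLex]
  norm_num
  omega

lemma key_sEv_lt_q (x : Int × String × Int) (p : Int) (r : String) :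
    pvEvKey (pvSEv x) < pvEvKey (p, 2, r) ↔ x.1 ≤ p := by
  simpa [pvSEv] using key_s_lt_q x.1 p x.2.1 r

lemma key_q_lt_eEv (x : Int × String × Int) (p : Int) (r : String) :
    pvEvKey (p, 2, r) < pvEvKey (pvEEv x) ↔ p ≤ x.2.2 := by
  simpa [pvEEv] using key_q_lt_e p x.2.2 r x.2.1

lemma key_s_lt_e (t : Int × String × Int) (h : t.1 ≤ t.2.2) :
    pvEvKey (pvSEv t) < pvEvKey (pvEEv t) := by
  simp only [pvEvKey, pvSEv, pvEEv, Prod.Lex.toLex_lt_toLex]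
  norm_num
  omega

lemma key_s_lt_s_imp_trip (a b : Int × String × Int)
    (h : pvEvKey (pvSEv a) < pvEvKey (pvSEv b)) : pvTripKey a < pvTripKey b := by
  obtain ⟨a1, a2, a3⟩ := a
  obtain ⟨b1, b2, b3⟩ := b
  simp only [pvEvKey, pvSEv, pvTripKey, Prod.Lex.toLex_lt_toLex] at *
  rcases h with h | ⟨he, h | ⟨_, h⟩⟩
  · exact Or.inl h
  · exact absurd h (lt_irrefl _)
  · exact Or.inr ⟨he, Or.inl h⟩

-- a predicate toggled on at t, which sits key-after every p-element of a strictly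
-- key-sorted list: the new filter appends t at the end
lemma filter_last {α K : Type} [LinearOrder K] (key : α → K) (p p' : α → Bool) (t : α) :
    ∀ l : List α, l.Pairwise (fun a b => key a < key b) → t ∈ l →
      p t = false → p' t = true →
      (∀ x ∈ l, x ≠ t → p' x = p x) → (∀ x ∈ l, p x = true → key x < key t) →
      l.filter p' = l.filter p ++ [t] := by
  intro l
  induction l with
  | nil => intro _ ht; exact absurd ht (List.not_mem_nil)
  | cons u us ih =>
    intro hpw hmem hpt hpt' hcong hlt
    rcases List.pairwise_cons.mp hpw with ⟨hhead, hpw'⟩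
    by_cases hut : u = t
    · subst hut
      have hnot : u ∉ us := fun h => absurd (hhead u h) (lt_irrefl _)
      have hnil : us.filter p = [] := by
        apply List.filter_eq_nil_iff.mpr
        intro x hx
        intro hpx
        exact absurd (hlt x (by simp [hx]) hpx) (not_lt_of_gt (hhead x hx))
      have hnil' : us.filter p' = [] := by
        apply List.filter_eq_nil_iff.mpr
        intro x hx hpx
        rw [hcong x (by simp [hx]) (fun h => hnot (h ▸ hx))] at hpx
        exact absurd (hlt x (by simp [hx]) hpx) (not_lt_of_gt (hhead x hx))
      simp [hpt, hpt', hnil, hnil']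
    · have hmem' : t ∈ us := by
        rcases List.mem_cons.mp hmem with h | h
        · exact absurd h.symm hut
        · exact h
      have hcu : p' u = p u := hcong u (by simp) hut
      have := ih hpw' hmem' hpt hpt'
        (fun x hx hxt => hcong x (by simp [hx]) hxt)
        (fun x hx hpx => hlt x (by simp [hx]) hpx)
      simp only [List.filter_cons, hcu]
      cases hpu : p u <;> simp [this]

-- remove of an element of a duplicate-free list is the filter dropping it
lemma remove_filter (xs : List String) (hx : xs.Nodup) (n : String) (h : n ∈ xs) :
    PySem.List.remove? xs n = some (xs.filter (fun x => x != n)) := by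
  rw [PySem.List.remove?_eq_some_erase xs n h, List.Nodup.erase_eq_filter hx]

-- a head that is no gene event leaves the open-set unchanged
lemma open_cons_ne (h : Int × Int × String) (tl : List (Int × Int × String))
    (t : Int × String × Int) (hs : pvSEv t ≠ h) (he : pvEEv t ≠ h) :
    pvOpen (h :: tl) t = pvOpen tl t := by
  simp [pvOpen, List.mem_cons, hs, he]

-- the dict effect of A's inner loop over in_gene equals B's single extend
lemma foldl_insert_append (k : String) :
    ∀ (act : List String) (d : PySem.Dict String (List String)),
      act.foldl (fun d g => d.insert k (d.getD k [] ++ [g])) d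
        = if act.isEmpty then d else d.insert k (d.getD k [] ++ act) := by
  intro act
  induction act with
  | nil => intro d; rfl
  | cons a l ih =>
    intro d
    simp only [List.foldl_cons, ih, List.isEmpty_cons]
    cases l with
    | nil => simp
    | cons b t =>
      norm_num
      rw [PySem.Dict.insert_insert_self]

lemma foldl2_insort {γ : Type} (e1 e2 : γ → Int × Int × String) :
    ∀ (l : List γ) (init : List (Int × Int × String)),
      l.foldl (fun acc x => pvInsort (pvInsort acc (e1 x)) (e2 x)) init
        = (l.flatMap fun x => [e1 x, e2 x]).foldl pvInsort init := by
  intro l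
  induction l with
  | nil => intro init; rfl
  | cons x xs ih => intro init; simp [List.flatMap_cons, ih]

lemma locations_eq_sorted (genes : List (String × List Int)) (ranges : List (Int × Int × String)) :
    pvLocations genes ranges = PySem.List.sorted (pvRawA genes ranges) pvEvKey := by
  show (genes.foldl _ (ranges.foldl _ [])) = _
  rw [foldl2_insort, foldl2_insort, ← List.foldl_append]
  exact (PySem.List.sorted_eq_foldl_insertBy _ _).symm

-- the heart of the file: on a sorted event list the A-sweep's dict is B's
-- stab-each-query fold, provided the carried active list is the open-gene filter
lemma sweep_main (SG : List (Int × String × Int))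
    (hnames : (SG.map (fun t => t.2.1)).Nodup)
    (hse : ∀ t ∈ SG, t.1 ≤ t.2.2)
    (hSGs : SG.Pairwise (fun a b => pvTripKey a < pvTripKey b)) :
    ∀ (l : List (Int × Int × String)) (d : PySem.Dict String (List String)),
      l.Pairwise (fun a b => pvEvKey a ≤ pvEvKey b) →
      (∀ e ∈ l, (∃ t ∈ SG, e = pvSEv t) ∨ (∃ t ∈ SG, e = pvEEv t) ∨ e.2.1 = 2 ∨ e.2.1 = 3) →
      (l.filter pvIsG).Nodup →
      (∀ t ∈ SG, pvSEv t ∈ l → pvEEv t ∈ l) →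
      (∀ t ∈ SG, pvSEv t ∉ l → ∀ e ∈ l, pvEvKey (pvSEv t) < pvEvKey e) →
      (∀ t ∈ SG, pvEEv t ∉ l → ∀ e ∈ l, pvEvKey (pvEEv t) < pvEvKey e) →
      (l.foldl pvStepA (d, pvActL SG l)).1
        = (l.filter (fun e => e.2.1 == 2)).foldl (fun d e => pvQStep SG d (e.1, e.2.2)) d := by
  intro l
  induction l with
  | nil => intro d _ _ _ _ _ _; rfl
  | cons h tl ih =>
    intro d h1 h2 h3 h4 h5 h6
    rcases List.pairwise_cons.mp h1 with ⟨hhead, h1'⟩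
    have hinj : ∀ x ∈ SG, ∀ y ∈ SG, x.2.1 = y.2.1 → x = y := by
      intro x hx y hy hxy
      exact List.inj_on_of_nodup_map hnames hx hy hxy
    rcases h2 h (by simp) with ⟨t, htSG, rfl⟩ | ⟨t, htSG, rfl⟩ | htag | htag
    · -- head is the gene-open event of t
      have hGh : pvIsG (pvSEv t) = true := by simp [pvIsG, pvSEv]
      have hfg : (pvSEv t :: tl).filter pvIsG = pvSEv t :: tl.filter pvIsG := by
        simp [hGh]
      have hnodup' : (tl.filter pvIsG).Nodup ∧ pvSEv t ∉ tl.filter pvIsG := by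
        rw [hfg] at h3
        exact ⟨h3.of_cons, (List.nodup_cons.mp h3).1⟩
      have hsnot : pvSEv t ∉ tl := fun hm => hnodup'.2 (List.mem_filter.mpr ⟨hm, hGh⟩)
      have hene : pvEEv t ≠ pvSEv t := by simp [pvSEv, pvEEv]
      have hein : pvEEv t ∈ tl := by
        rcases List.mem_cons.mp (h4 t htSG (by simp)) with h | h
        · exact absurd h hene
        · exact h
      -- strictness below the consumed head
      have hstrict : ∀ e ∈ tl, pvEvKey (pvSEv t) < pvEvKey e := by
        intro e he
        rcases lt_or_eq_of_le (hhead e he) with h | h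
        · exact h
        · exact absurd ((pvEvKey_inj _ _ h) ▸ he) hsnot
      -- the new active list appends t's name
      have hact : pvActL SG tl = pvActL SG (pvSEv t :: tl) ++ [t.2.1] := by
        have := filter_last pvTripKey (pvOpen (pvSEv t :: tl)) (pvOpen tl) t SG hSGs htSG
          (by simp [pvOpen])
          (by simp [pvOpen, hsnot, hein])
          (by
            intro x hx hxt
            refine (open_cons_ne _ _ _ ?_ ?_).symm
            · intro hcontra
              exact hxt (hinj x hx t htSG (by
                have := congrArg (fun e => e.2.2) hcontra
                simpa [pvSEv] using this))
            · simp [pvSEv, pvEEv])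
          (by
            intro x hx hpx
            have hxs : pvSEv x ∉ pvSEv t :: tl := by
              simp only [pvOpen, Bool.and_eq_true, Bool.not_eq_eq_eq_not, Bool.not_true,
                decide_eq_false_iff_not] at hpx
              exact hpx.1
            exact key_s_lt_s_imp_trip x t (h5 x hx hxs (pvSEv t) (by simp)))
        unfold pvActL
        rw [this]
        simp
      rw [List.foldl_cons]
      have hstep : pvStepA (d, pvActL SG (pvSEv t :: tl)) (pvSEv t)
          = (d, pvActL SG tl) := by
        simp [pvStepA, pvSEv, hact]
      rw [hstep]
      have hfilt : (pvSEv t :: tl).filter (fun e => e.2.1 == 2) = tl.filter (fun e => e.2.1 == 2) := by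
        simp [pvSEv]
      rw [hfilt]
      apply ih d h1'
      · exact fun e he => h2 e (by simp [he])
      · exact hnodup'.1
      · intro x hx hxm
        rcases List.mem_cons.mp (h4 x hx (by simp [hxm])) with h | h
        · exact absurd (hinj x hx t htSG (by
            have := congrArg (fun e => e.2.2) h
            simpa [pvSEv, pvEEv] using this)) (by
            intro hxt; subst hxt
            simp only [pvSEv, pvEEv] at h
            have := congrArg (fun e => e.2.1) h
            simp at this)
        · exact h
      · intro x hx hxs e he
        by_cases hin : pvSEv x ∈ pvSEv t :: tl
        · have : pvSEv x = pvSEv t := by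
            rcases List.mem_cons.mp hin with h | h
            · exact h
            · exact absurd h hxs
          rw [this]
          exact hstrict e he
        · exact h5 x hx hin e (by simp [he])
      · intro x hx hxe e he
        have hne : pvEEv x ≠ pvSEv t := by simp [pvSEv, pvEEv]
        exact h6 x hx (by simp [hxe, hne]) e (by simp [he])
    · -- head is the gene-close event of t
      have hGh : pvIsG (pvEEv t) = true := by simp [pvIsG, pvEEv]
      have hfg : (pvEEv t :: tl).filter pvIsG = pvEEv t :: tl.filter pvIsG := by
        simp [hGh]
      have hnodup' : (tl.filter pvIsG).Nodup ∧ pvEEv t ∉ tl.filter pvIsG := by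
        rw [hfg] at h3
        exact ⟨h3.of_cons, (List.nodup_cons.mp h3).1⟩
      have henot : pvEEv t ∉ tl := fun hm => hnodup'.2 (List.mem_filter.mpr ⟨hm, hGh⟩)
      have hsne : pvSEv t ≠ pvEEv t := by simp [pvSEv, pvEEv]
      have hsnot : pvSEv t ∉ pvEEv t :: tl := by
        intro hm
        rcases List.mem_cons.mp hm with h | h
        · exact hsne h
        · exact absurd (key_s_lt_e t (hse t htSG)) (not_lt_of_ge (hhead _ h))
      have hopen : pvOpen (pvEEv t :: tl) t = true := by
        simp [pvOpen, hsnot]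
      have hactnd : (pvActL SG (pvEEv t :: tl)).Nodup := by
        exact List.Nodup.sublist (List.Sublist.map _ List.filter_sublist) hnames
      have hmemact : t.2.1 ∈ pvActL SG (pvEEv t :: tl) := by
        exact List.mem_map.mpr ⟨t, List.mem_filter.mpr ⟨htSG, hopen⟩, rfl⟩
      have hrm := remove_filter _ hactnd _ hmemact
      have hact2 : (pvActL SG (pvEEv t :: tl)).filter (fun x => x != t.2.1) = pvActL SG tl := by
        unfold pvActL
        rw [List.filter_map, List.filter_filter]
        congr 1
        apply List.filter_congr
        intro x hx
        by_cases hxt : x = t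
        · subst hxt
          simp [Function.comp, pvOpen, henot]
        · have hnm : x.2.1 ≠ t.2.1 := fun h => hxt (hinj x hx t htSG h)
          have h1x : pvSEv x ≠ pvEEv t := by simp [pvSEv, pvEEv]
          have h2x : pvEEv x ≠ pvEEv t := by
            intro h
            exact hxt (hinj x hx t htSG (by
              have := congrArg (fun e => e.2.2) h
              simpa [pvEEv] using this))
          rw [open_cons_ne _ _ _ h1x h2x]
          simp [Function.comp, hnm]
      rw [List.foldl_cons]
      have hstepA_e : ∀ (st : PySem.Dict String (List String) × List String),
          pvStepA st (pvEEv t) = (st.1, (PySem.List.remove? st.2 t.2.1).getD st.2) := by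
        intro st
        simp [pvStepA, pvEEv]
      have hstep : pvStepA (d, pvActL SG (pvEEv t :: tl)) (pvEEv t) = (d, pvActL SG tl) := by
        rw [hstepA_e, hrm]
        simp [hact2]
      rw [hstep]
      have hfilt : (pvEEv t :: tl).filter (fun e => e.2.1 == 2) = tl.filter (fun e => e.2.1 == 2) := by
        simp [pvEEv]
      rw [hfilt]
      have hstrict : ∀ e ∈ tl, pvEvKey (pvEEv t) < pvEvKey e := by
        intro e he
        rcases lt_or_eq_of_le (hhead e he) with h | h
        · exact h
        · exact absurd ((pvEvKey_inj _ _ h) ▸ he) henot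
      apply ih d h1'
      · exact fun e he => h2 e (by simp [he])
      · exact hnodup'.1
      · intro x hx hxm
        have hxsm : pvSEv x ∈ pvEEv t :: tl := by simp [hxm]
        rcases List.mem_cons.mp (h4 x hx hxsm) with h | h
        · exfalso
          have hxt : x = t := hinj x hx t htSG (by
            have := congrArg (fun e => e.2.2) h
            simpa [pvEEv] using this)
          subst hxt
          exact hsnot hxsm
        · exact h
      · intro x hx hxs e he
        have hne : pvSEv x ≠ pvEEv t := by simp [pvSEv, pvEEv]
        exact h5 x hx (by simp [hxs, hne]) e (by simp [he])
      · intro x hx hxe e he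
        by_cases hin : pvEEv x ∈ pvEEv t :: tl
        · have : pvEEv x = pvEEv t := by
            rcases List.mem_cons.mp hin with h | h
            · exact h
            · exact absurd h hxe
          rw [this]
          exact hstrict e he
        · exact h6 x hx hin e (by simp [he])
    · -- head is a range-start event
      obtain ⟨p, tg, r⟩ := h
      have htg : tg = 2 := htag
      subst htg
      have hne1 : ∀ x : Int × String × Int, pvSEv x ≠ (p, 2, r) := by
        intro x
        simp [pvSEv, Prod.ext_iff]
      have hne4 : ∀ x : Int × String × Int, pvEEv x ≠ (p, 2, r) := by
        intro x
        simp [pvEEv, Prod.ext_iff]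
      have hact : pvActL SG ((p, 2, r) :: tl) = pvActL SG tl := by
        unfold pvActL
        congr 1
        exact List.filter_congr (fun x _ => open_cons_ne _ tl x (hne1 x) (hne4 x))
      -- the active list at a range start is exactly B's stab list
      have hstab : pvActL SG ((p, 2, r) :: tl) = pvHits SG p := by
        unfold pvActL pvHits
        congr 1
        apply List.filter_congr
        intro x hx
        have hs' : pvSEv x ∈ (p, 2, r) :: tl ↔ ¬ x.1 ≤ p := by
          constructor
          · intro hm hle
            rcases List.mem_cons.mp hm with hh | hh
            · exact hne1 x hh
            · exact absurd ((key_sEv_lt_q x p r).mpr hle) (not_lt_of_ge (hhead _ hh))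
          · intro hnle
            by_contra hnot
            exact hnle ((key_sEv_lt_q x p r).mp (h5 x hx hnot (p, 2, r) (by simp)))
        have he' : pvEEv x ∈ (p, 2, r) :: tl ↔ p ≤ x.2.2 := by
          constructor
          · intro hm
            rcases List.mem_cons.mp hm with hh | hh
            · exact absurd hh (hne4 x)
            · rcases lt_or_eq_of_le (hhead _ hh) with hlt | heq
              · exact (key_q_lt_eEv x p r).mp hlt
              · exact absurd (pvEvKey_inj _ _ heq).symm (hne4 x)
          · intro hle
            by_contra hnot
            exact absurd ((key_q_lt_eEv x p r).mpr hle)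
              (asymm (h6 x hx hnot (p, 2, r) (by simp)))
        by_cases hc1 : x.1 ≤ p <;> by_cases hc2 : p ≤ x.2.2 <;>
          simp [pvOpen, hs', he', hc1, hc2]
      rw [List.foldl_cons]
      have hstep : pvStepA (d, pvActL SG ((p, 2, r) :: tl)) (p, 2, r)
          = (pvQStep SG d (p, r), pvActL SG tl) := by
        have hred : pvStepA (d, pvActL SG ((p, 2, r) :: tl)) (p, 2, r)
            = ((pvActL SG ((p, 2, r) :: tl)).foldl
                 (fun d g => d.insert r (d.getD r [] ++ [g])) d,
               pvActL SG ((p, 2, r) :: tl)) := by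
          simp [pvStepA]
        rw [hred, Prod.mk.injEq]
        constructor
        · rw [foldl_insert_append, hstab]
          simp [pvQStep]
        · exact hact
      rw [hstep]
      have hfilt : ((p, 2, r) :: tl).filter (fun e => e.2.1 == 2)
          = (p, 2, r) :: tl.filter (fun e => e.2.1 == 2) := by
        simp
      rw [hfilt, List.foldl_cons]
      apply ih _ h1'
      · exact fun e he => h2 e (by simp [he])
      · have : ((p, 2, r) :: tl).filter pvIsG = tl.filter pvIsG := by
          simp [pvIsG]
        rw [this] at h3
        exact h3
      · intro x hx hxm
        rcases List.mem_cons.mp (h4 x hx (by simp [hxm])) with hh | hh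
        · exact absurd hh (hne4 x)
        · exact hh
      · intro x hx hxs e he
        exact h5 x hx (by simp [hxs, hne1 x]) e (by simp [he])
      · intro x hx hxe e he
        exact h6 x hx (by simp [hxe, hne4 x]) e (by simp [he])
    · -- head is an inert range-end event
      obtain ⟨p, tg, r⟩ := h
      have htg : tg = 3 := htag
      subst htg
      have hne1 : ∀ x : Int × String × Int, pvSEv x ≠ (p, 3, r) := by
        intro x
        simp [pvSEv, Prod.ext_iff]
      have hne4 : ∀ x : Int × String × Int, pvEEv x ≠ (p, 3, r) := by
        intro x
        simp [pvEEv, Prod.ext_iff]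
      have hact : pvActL SG ((p, 3, r) :: tl) = pvActL SG tl := by
        unfold pvActL
        congr 1
        exact List.filter_congr (fun x _ => open_cons_ne _ tl x (hne1 x) (hne4 x))
      rw [List.foldl_cons]
      have hstep : pvStepA (d, pvActL SG ((p, 3, r) :: tl)) (p, 3, r) = (d, pvActL SG tl) := by
        simp [pvStepA, hact]
      rw [hstep]
      have hfilt : ((p, 3, r) :: tl).filter (fun e => e.2.1 == 2)
          = tl.filter (fun e => e.2.1 == 2) := by
        simp
      rw [hfilt]
      apply ih _ h1'
      · exact fun e he => h2 e (by simp [he])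
      · have : ((p, 3, r) :: tl).filter pvIsG = tl.filter pvIsG := by
          simp [pvIsG]
        rw [this] at h3
        exact h3
      · intro x hx hxm
        rcases List.mem_cons.mp (h4 x hx (by simp [hxm])) with hh | hh
        · exact absurd hh (hne4 x)
        · exact hh
      · intro x hx hxs e he
        exact h5 x hx (by simp [hxs, hne1 x]) e (by simp [he])
      · intro x hx hxe e he
        exact h6 x hx (by simp [hxe, hne4 x]) e (by simp [he])

-- gene events of distinct-named genes are pairwise distinct
lemma gene_events_nodup :
    ∀ (genes : List (String × List Int)), (genes.map Prod.fst).Nodup →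
      (genes.flatMap fun g => [pvSEv (pvTrip g), pvEEv (pvTrip g)]).Nodup := by
  intro genes
  induction genes with
  | nil => intro _; simp
  | cons g gs ih =>
    intro h
    rcases List.nodup_cons.mp h with ⟨hg, hgs⟩
    have hname : ∀ e ∈ gs.flatMap (fun g => [pvSEv (pvTrip g), pvEEv (pvTrip g)]),
        e.2.2 ∈ gs.map Prod.fst := by
      intro e he
      rcases List.mem_flatMap.mp he with ⟨g', hg', hm⟩
      rcases List.mem_cons.mp hm with rfl | hm2
      · exact List.mem_map.mpr ⟨g', hg', rfl⟩
      · rcases List.mem_cons.mp hm2 with rfl | hm3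
        · exact List.mem_map.mpr ⟨g', hg', rfl⟩
        · exact absurd hm3 (List.not_mem_nil)
    have hnotin : ∀ e ∈ gs.flatMap (fun g => [pvSEv (pvTrip g), pvEEv (pvTrip g)]),
        e.2.2 ≠ g.1 := fun e he hc => hg (hc ▸ hname e he)
    simp only [List.flatMap_cons, List.cons_append, List.nil_append]
    apply List.nodup_cons.mpr
    refine ⟨?_, List.nodup_cons.mpr ⟨?_, ih hgs⟩⟩
    · intro hm
      rcases List.mem_cons.mp hm with h' | h'
      · have := congrArg (fun e => e.2.1) h'
        simp [pvSEv, pvEEv] at this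
      · exact hnotin _ h' rfl
    · intro hm
      exact hnotin _ hm rfl

lemma raw_filter_isG (genes : List (String × List Int)) (ranges : List (Int × Int × String)) :
    (pvRawA genes ranges).filter pvIsG
      = genes.flatMap fun g => [pvSEv (pvTrip g), pvEEv (pvTrip g)] := by
  unfold pvRawA
  rw [List.filter_append]
  have h1 : (ranges.flatMap fun ran => [(ran.1, 2, ran.2.2), (ran.2.1, 3, ran.2.2)]).filter pvIsG
      = [] := by
    rw [List.filter_flatMap]
    simp [pvIsG]
  have h2 : (genes.flatMap fun g => [pvSEv (pvTrip g), pvEEv (pvTrip g)]).filter pvIsG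
      = genes.flatMap fun g => [pvSEv (pvTrip g), pvEEv (pvTrip g)] := by
    apply List.filter_eq_self.mpr
    intro e he
    rcases List.mem_flatMap.mp he with ⟨g', _, hm⟩
    rcases List.mem_cons.mp hm with rfl | hm2
    · simp [pvIsG, pvSEv]
    · rcases List.mem_cons.mp hm2 with rfl | hm3
      · simp [pvIsG, pvEEv]
      · exact absurd hm3 (List.not_mem_nil)
  rw [h1, h2, List.nil_append]

lemma raw_filter_q (genes : List (String × List Int)) (ranges : List (Int × Int × String)) :
    (pvRawA genes ranges).filter (fun e => e.2.1 == 2)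
      = ranges.map (fun ran => (ran.1, 2, ran.2.2)) := by
  unfold pvRawA
  rw [List.filter_append, List.filter_flatMap, List.filter_flatMap]
  simp only [List.filter_cons, List.filter_nil]
  norm_num [pvSEv, pvEEv]
  induction ranges with
  | nil => simp
  | cons ran rs ih => simp [ih]

lemma key_le_q_le (p p' : Int) (r r' : String)
    (h : pvEvKey (p, 2, r) ≤ pvEvKey (p', 2, r')) : toLex (p, r) ≤ toLex (p', r') := by
  simp only [pvEvKey, Prod.Lex.toLex_le_toLex] at *
  rcases h with h | ⟨he, h | ⟨_, h⟩⟩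
  · exact Or.inl h
  · exact absurd h (lt_irrefl _)
  · exact Or.inr ⟨he, h⟩

-- ===== VERDICT (by name: the statement is the Claim_ definition above) =====
theorem range_in_gene_spec : Claim_equal_range_in_gene := by
  intro genes ranges _dom hpre
  obtain ⟨hnodup, hlens⟩ := hpre
  unfold Spec_range_in_gene range_in_gene range_in_gene_alt
  rw [locations_eq_sorted]
  set SG := pvOrderB genes with hSGdef
  set L := PySem.List.sorted (pvRawA genes ranges) pvEvKey with hLdef
  have hGperm : SG.Perm (genes.map pvTrip) := PySem.List.sorted_perm _ _ _
  have hnames : (SG.map (fun t => t.2.1)).Nodup := by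
    have hp : (SG.map (fun t => t.2.1)).Perm ((genes.map pvTrip).map (fun t => t.2.1)) :=
      hGperm.map _
    have he : (genes.map pvTrip).map (fun t => t.2.1) = genes.map Prod.fst := by
      rw [List.map_map]; rfl
    rw [he] at hp
    exact hp.nodup_iff.mpr hnodup
  have hse : ∀ t ∈ SG, t.1 ≤ t.2.2 := by
    intro t ht
    rcases List.mem_map.mp (hGperm.mem_iff.mp ht) with ⟨g, hg, rfl⟩
    exact (hlens g hg).2
  have hSGs : SG.Pairwise (fun a b => pvTripKey a < pvTripKey b) := by
    have h1 : SG.Pairwise (fun a b => pvTripKey a ≤ pvTripKey b) :=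
      PySem.List.sorted_pairwise _ _
    have h2 : SG.Pairwise (fun a b => a.2.1 ≠ b.2.1) := List.pairwise_map.mp hnames
    exact (h1.and h2).imp (fun {a b} hab =>
      lt_of_le_of_ne hab.1 (fun hk => hab.2 (congrArg (fun t => t.2.1) (pvTripKey_inj a b hk))))
  have hL1 : L.Pairwise (fun a b => pvEvKey a ≤ pvEvKey b) := PySem.List.sorted_pairwise _ _
  have hLperm : L.Perm (pvRawA genes ranges) := PySem.List.sorted_perm _ _ _
  have hEvL : ∀ t ∈ SG, pvSEv t ∈ L ∧ pvEEv t ∈ L := by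
    intro t ht
    rcases List.mem_map.mp (hGperm.mem_iff.mp ht) with ⟨g, hg, rfl⟩
    constructor <;>
      · rw [hLperm.mem_iff]
        unfold pvRawA
        exact List.mem_append_right _ (List.mem_flatMap.mpr ⟨g, hg, by simp⟩)
  have h2 : ∀ e ∈ L, (∃ t ∈ SG, e = pvSEv t) ∨ (∃ t ∈ SG, e = pvEEv t) ∨ e.2.1 = 2 ∨ e.2.1 = 3 := by
    intro e he
    rw [hLperm.mem_iff] at he
    unfold pvRawA at he
    rcases List.mem_append.mp he with h | h
    · rcases List.mem_flatMap.mp h with ⟨ran, _, hm⟩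
      rcases List.mem_cons.mp hm with rfl | hm2
      · exact Or.inr (Or.inr (Or.inl rfl))
      · rcases List.mem_cons.mp hm2 with rfl | hm3
        · exact Or.inr (Or.inr (Or.inr rfl))
        · exact absurd hm3 (List.not_mem_nil)
    · rcases List.mem_flatMap.mp h with ⟨g, hg, hm⟩
      have htg : pvTrip g ∈ SG := hGperm.mem_iff.mpr (List.mem_map.mpr ⟨g, hg, rfl⟩)
      rcases List.mem_cons.mp hm with rfl | hm2
      · exact Or.inl ⟨pvTrip g, htg, rfl⟩
      · rcases List.mem_cons.mp hm2 with rfl | hm3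
        · exact Or.inr (Or.inl ⟨pvTrip g, htg, rfl⟩)
        · exact absurd hm3 (List.not_mem_nil)
  have h3 : (L.filter pvIsG).Nodup := by
    have hnd := gene_events_nodup genes hnodup
    rw [← raw_filter_isG genes ranges] at hnd
    exact ((hLperm.filter pvIsG).nodup_iff).mpr hnd
  have hact0 : pvActL SG L = [] := by
    unfold pvActL
    have : SG.filter (pvOpen L) = [] :=
      List.filter_eq_nil_iff.mpr (fun t ht => by simp [pvOpen, (hEvL t ht).1])
    rw [this, List.map_nil]
  have hmain := sweep_main SG hnames hse hSGs L PySem.Dict.empty hL1 h2 h3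
    (fun t ht _ => (hEvL t ht).2)
    (fun t ht hn => absurd (hEvL t ht).1 hn)
    (fun t ht hn => absurd (hEvL t ht).2 hn)
  have hfm : ((L.filter (fun e => e.2.1 == 2)).map (fun e => (e.1, e.2.2))).foldl
        (pvQStep SG) PySem.Dict.empty
      = (L.filter (fun e => e.2.1 == 2)).foldl
          (fun d e => pvQStep SG d (e.1, e.2.2)) PySem.Dict.empty :=
    List.foldl_map
  rw [← hact0, hmain, ← hfm]
  have hqeq : (L.filter (fun e => e.2.1 == 2)).map (fun e => (e.1, e.2.2))
      = PySem.List.sorted (ranges.map (fun ran => (ran.1, ran.2.2))) (fun q => toLex q) := by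
    refine List.eq_of_perm_of_sorted (le := fun a b => toLex a ≤ toLex b) ?_ ?_ ?_ ?_
    · exact fun a b _ _ hab hba => by
        have := le_antisymm hab hba
        exact (toLex_inj).mp this
    · apply List.pairwise_map.mpr
      refine List.Pairwise.imp_of_mem ?_ (hL1.filter (fun e => e.2.1 == 2))
      intro a b ha hb hab
      have ha2 : a.2.1 = 2 := by simpa using (List.mem_filter.mp ha).2
      have hb2 : b.2.1 = 2 := by simpa using (List.mem_filter.mp hb).2
      obtain ⟨p, tg, r⟩ := a
      obtain ⟨p', tg', r'⟩ := b
      simp only at ha2 hb2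
      subst ha2; subst hb2
      exact key_le_q_le p p' r r' hab
    · exact PySem.List.sorted_pairwise _ _
    · have hp : ((L.filter (fun e => e.2.1 == 2)).map (fun e => (e.1, e.2.2))).Perm
          (((pvRawA genes ranges).filter (fun e => e.2.1 == 2)).map (fun e => (e.1, e.2.2))) :=
        (hLperm.filter _).map _
      rw [raw_filter_q, List.map_map] at hp
      exact hp.trans (PySem.List.sorted_perm _ _ _).symm
  rw [hqeq]
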